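-- pv_equiv track=rewrite | github.com/OpenSourceSam/v2_heras_garden | scripts/guards/check_project_godot_autoload.py | parse_autoload_section
-- ===== SOURCE A (Python) =====
-- def parse_autoload_section(text: str) -> dict:
-- 	entries = {}
-- 	in_autoload = False
-- 	for line in text.splitlines():
-- 		stripped = line.strip()
-- 		if stripped.startswith("[") and stripped.endswith("]"):
-- 			in_autoload = stripped.lower() == "[autoload]"
-- 			continue
-- 		if not in_autoload or not stripped or stripped.startswith(";"):
-- 			continue
-- 		if "=" in line:
-- 			key, value = line.split("=", 1)
-- 			entries[key.strip()] = value.strip()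
-- 	return entries
-- ===== SOURCE B (Python) =====
-- def parse_autoload_section(text: str) -> dict:
-- 	# Pass 1: group raw non-header lines under their lowercased section header.
-- 	sections = {}
-- 	current = None
-- 	for line in text.splitlines():
-- 		s = line.strip()
-- 		if s.startswith("[") and s.endswith("]"):
-- 			current = s.lower()
-- 		elif current is not None:
-- 			sections[current] = sections.get(current, []) + [line]
-- 	# Pass 2: parse only the lines collected under [autoload].
-- 	entries = {}
-- 	for line in sections.get("[autoload]", []):
-- 		s = line.strip()
-- 		if s and not s.startswith(";") and "=" in line:
-- 			key, value = line.split("=", 1)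
-- 			entries[key.strip()] = value.strip()
-- 	return entries
-- ===== Notes on version B (the rewrite author's own statement) =====
-- stated objective: alternative
-- what changed: Replaces A's single stateful scan (in_autoload flag deciding per line) with a two-pass decomposition: first group raw non-header lines under their lowercased section header into a dict, then parse blanks/comments/key=value only from the lines collected under '[autoload]'.
import Mathlib
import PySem

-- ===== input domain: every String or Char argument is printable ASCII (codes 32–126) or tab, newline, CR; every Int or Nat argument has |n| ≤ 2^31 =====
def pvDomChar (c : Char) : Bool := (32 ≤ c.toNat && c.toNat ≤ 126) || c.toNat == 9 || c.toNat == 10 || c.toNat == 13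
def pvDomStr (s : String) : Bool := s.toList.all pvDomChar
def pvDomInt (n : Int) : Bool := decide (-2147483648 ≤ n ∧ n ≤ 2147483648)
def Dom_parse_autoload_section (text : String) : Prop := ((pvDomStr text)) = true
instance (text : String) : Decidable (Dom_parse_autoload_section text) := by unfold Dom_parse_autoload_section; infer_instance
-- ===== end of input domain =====

-- B replaces A's single stateful scan with a two-pass decomposition (group lines by section, then parse the autoload group); alternative structure, same cost.


-- ===== PORT A =====
-- A's loop body: state = (entries dict, in_autoload flag)
def pvStepA (st : PySem.Dict String String × Bool) (line : String) : PySem.Dict String String × Bool :=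
  let s := PySem.Str.strip line
  if PySem.Str.startswith s "[" && PySem.Str.endswith s "]" then
    (st.1, PySem.Str.lower s == "[autoload]")
  else if !st.2 || s == "" || PySem.Str.startswith s ";" then st
  else if PySem.Str.isIn "=" line then
    -- line.split("=", 1): with "=" in line this yields exactly two pieces
    match PySem.Str.splitMax? line "=" 1 with
    | some (k :: v :: _) => (st.1.insert (PySem.Str.strip k) (PySem.Str.strip v), st.2)
    | _ => st
  else st

def parse_autoload_section (text : String) : List (String × String) :=
  ((PySem.Str.splitlines text).foldl pvStepA (PySem.Dict.empty, false)).1.items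

-- ===== PORT B =====
-- B pass 1: group raw non-header lines under the lowercased current section header
def pvStep1 (st : PySem.Dict String (List String) × Option String) (line : String) :
    PySem.Dict String (List String) × Option String :=
  let s := PySem.Str.strip line
  if PySem.Str.startswith s "[" && PySem.Str.endswith s "]" then
    (st.1, some (PySem.Str.lower s))
  else
    match st.2 with
    | some c => (st.1.insert c (st.1.getD c [] ++ [line]), st.2)
    | none => st

-- B pass 2: parse one collected autoload line into the entries dict
def pvStep2 (e : PySem.Dict String String) (line : String) : PySem.Dict String String :=
  let s := PySem.Str.strip line
  if !(s == "") && !(PySem.Str.startswith s ";") && PySem.Str.isIn "=" line then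
    match PySem.Str.splitMax? line "=" 1 with
    | some (k :: v :: _) => e.insert (PySem.Str.strip k) (PySem.Str.strip v)
    | _ => e
  else e

def parse_autoload_section_alt (text : String) : List (String × String) :=
  let sections := (PySem.Str.splitlines text).foldl pvStep1 (PySem.Dict.empty, none)
  ((sections.1.getD "[autoload]" []).foldl pvStep2 PySem.Dict.empty).items

-- ===== PRECONDITION & SPEC =====
def Spec_parse_autoload_section (text : String) (out : List (String × String)) : Prop := out = parse_autoload_section_alt text
instance (text : String) (out : List (String × String)) : Decidable (Spec_parse_autoload_section text out) := by unfold Spec_parse_autoload_section; infer_instance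

-- ===== CLAIM (what is proved, stated in full; the proofs are below) =====
def Claim_equal_parse_autoload_section : Prop := ∀ (text : String), Dom_parse_autoload_section text → Spec_parse_autoload_section text (parse_autoload_section text)

-- ===== LEMMAS AND PROOFS =====

-- the raw autoload-body lines A would consider, given the current in-autoload flag
def pvCollect (b : Bool) : List String → List String
  | [] => []
  | l :: ls =>
    let s := PySem.Str.strip l
    if PySem.Str.startswith s "[" && PySem.Str.endswith s "]" then
      pvCollect (PySem.Str.lower s == "[autoload]") ls
    else (if b then [l] else []) ++ pvCollect b ls

theorem pvA_eq_collect (ls : List String) (e : PySem.Dict String String) (b : Bool) :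
    (ls.foldl pvStepA (e, b)).1 = (pvCollect b ls).foldl pvStep2 e := by
  induction ls generalizing e b with
  | nil => simp [pvCollect]
  | cons l ls ih =>
    simp only [List.foldl_cons, pvStepA, pvCollect]
    by_cases hh : PySem.Chars.startswith (PySem.Chars.strip l.toList) ['['] = true ∧
        PySem.Chars.endswith (PySem.Chars.strip l.toList) [']'] = true
    · simp [hh, ih]
    · cases b with
      | false => simp [hh, ih]
      | true =>
        by_cases h1 : PySem.Str.strip l = ""
        · simp [h1, ih, pvStep2,
            (by decide : PySem.Chars.startswith ([] : List Char) ['['] = false)]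
        · by_cases h2 : PySem.Chars.startswith (PySem.Chars.strip l.toList) [';'] = true
          · simp [hh, h1, h2, ih, pvStep2]
          · by_cases h3 : PySem.Chars.isIn ['='] l.toList = true
            · cases hsp : PySem.Str.splitMax? l "=" 1 with
              | none => simp [hh, h1, h2, h3, hsp, ih, pvStep2]
              | some parts =>
                match parts with
                | [] => simp [hh, h1, h2, h3, hsp, ih, pvStep2]
                | [k] => simp [hh, h1, h2, h3, hsp, ih, pvStep2]
                | k :: v :: rest2 => simp [hh, h1, h2, h3, hsp, ih, pvStep2]
            · simp [hh, h1, h2, h3, ih, pvStep2]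

theorem pvB_getD_collect (ls : List String) (d : PySem.Dict String (List String)) (c : Option String) :
    ((ls.foldl pvStep1 (d, c)).1).getD "[autoload]" [] =
      d.getD "[autoload]" [] ++ pvCollect (c == some "[autoload]") ls := by
  induction ls generalizing d c with
  | nil => simp [pvCollect]
  | cons l ls ih =>
    simp only [List.foldl_cons, pvStep1, pvCollect]
    by_cases hh : PySem.Chars.startswith (PySem.Chars.strip l.toList) ['['] = true ∧
        PySem.Chars.endswith (PySem.Chars.strip l.toList) [']'] = true
    · simp [hh, ih]
    · cases c with
      | none => simp [hh, ih]
      | some k =>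
        have hh2 : ¬((PySem.Str.startswith (PySem.Str.strip l) "[" &&
            PySem.Str.endswith (PySem.Str.strip l) "]") = true) := by simpa using hh
        rw [if_neg hh2, if_neg hh2]
        rw [ih]
        by_cases hk : k = "[autoload]"
        · subst hk
          simp [hh, PySem.Dict.getD_insert_self]
        · simp [hh, PySem.Dict.getD_insert, hk, Ne.symm hk]

-- ===== VERDICT (by name: the statement is the Claim_ definition above) =====
theorem parse_autoload_section_spec : Claim_equal_parse_autoload_section := by
  intro text _
  unfold Spec_parse_autoload_section parse_autoload_section parse_autoload_section_alt
  simp only [pvA_eq_collect, pvB_getD_collect, PySem.Dict.getD_empty]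
  simp
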